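-- pv_equiv track=rewrite | github.com/nataliegarate/python_ds | lists/remove_evens.py | removeEven
-- ===== SOURCE A (Python) =====
-- def removeEven(List):
--     num_of_evens = 0
--     idx = 0
--     for num in List:
--         if num % 2 == 0:
--             num_of_evens += 1
--         else:
--             List[idx - num_of_evens] = num
--         idx += 1
--     count = 0
--     while count < num_of_evens:
--         List.pop()
--         count += 1
--     return List
-- ===== SOURCE B (Python) =====
-- def removeEven(List):
--     List[:] = [x for x in List if x % 2 != 0]
--     return List
-- ===== Notes on version B (the rewrite author's own statement) =====
-- stated objective: idiomatic
-- what changed: Replaces A's two-pointer in-place compaction plus trailing pop-truncation loop with a single filter comprehension assigned back via slice assignment (same object, same contents).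
import Mathlib
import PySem

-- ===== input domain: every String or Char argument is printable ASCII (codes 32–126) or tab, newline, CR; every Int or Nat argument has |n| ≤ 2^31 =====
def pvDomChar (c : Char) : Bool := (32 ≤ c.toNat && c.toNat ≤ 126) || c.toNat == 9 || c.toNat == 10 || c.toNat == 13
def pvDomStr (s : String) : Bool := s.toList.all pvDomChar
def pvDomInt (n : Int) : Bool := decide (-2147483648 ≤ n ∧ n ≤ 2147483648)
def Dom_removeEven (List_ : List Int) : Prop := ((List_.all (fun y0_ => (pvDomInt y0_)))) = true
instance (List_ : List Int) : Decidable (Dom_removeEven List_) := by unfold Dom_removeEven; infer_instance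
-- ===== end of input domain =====

-- ===== PORT A =====
-- Loop of A: iterate idx over the (mutated) list, counting evens and compacting odds forward.
-- 'for num in List' reads by index from the current list (CPython iterator semantics); writes
-- only occur at positions ≤ idx, modelled exactly by reading lst.getD idx from the current state.
def removeEvenGo (lst : List Int) (numEvens idx n : Nat) : List Int × Nat :=
  if _h : idx < n then
    let num := lst.getD idx 0
    if PySem.Int.mod num 2 == 0 then
      removeEvenGo lst (numEvens + 1) (idx + 1) n
    else
      removeEvenGo (lst.set (idx - numEvens) num) numEvens (idx + 1) n
  else (lst, numEvens)
termination_by n - idx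

-- 'while count < num_of_evens: List.pop()' — pop() removes the last element (never empty here),
-- ported as dropLast, exact since the list is nonempty whenever the loop body runs.
def removeEvenPop (lst : List Int) (count numEvens : Nat) : List Int :=
  if _h : count < numEvens then removeEvenPop lst.dropLast (count + 1) numEvens
  else lst
termination_by numEvens - count

def removeEven (List_ : List Int) : List Int :=
  let r := removeEvenGo List_ 0 0 List_.length
  removeEvenPop r.1 0 r.2

-- ===== PORT B =====
def removeEven_alt (List_ : List Int) : List Int :=
  List_.filter (fun x => PySem.Int.mod x 2 != 0)

-- ===== PRECONDITION & SPEC =====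
def Spec_removeEven (List_ : List Int) (out : List Int) : Prop := out = removeEven_alt List_
instance (List_ : List Int) (out : List Int) : Decidable (Spec_removeEven List_ out) := by unfold Spec_removeEven; infer_instance

-- ===== CLAIM (what is proved, stated in full; the proofs are below) =====
def Claim_equal_removeEven : Prop := ∀ (List_ : List Int), Dom_removeEven List_ → Spec_removeEven List_ (removeEven List_)

-- ===== LEMMAS AND PROOFS =====

-- Invariant of A's compaction loop: the list state is F ++ M ++ rest where F holds the odd
-- elements already compacted, M is the garbage window of length numEvens, and rest is the
-- untouched original suffix starting at idx.
lemma go_spec (p : Int → Bool) (hp : p = fun x => PySem.Int.mod x 2 != 0) :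
    ∀ (rest F M : List Int) (k i n : Nat),
      k = M.length → i = F.length + M.length → n = F.length + M.length + rest.length →
      ∃ M' : List Int,
        removeEvenGo (F ++ M ++ rest) k i n = (F ++ rest.filter p ++ M', M'.length) := by
  intro rest
  induction rest with
  | nil =>
    intro F M k i n hk hi hn
    subst hk hi hn
    refine ⟨M, ?_⟩
    rw [removeEvenGo, dif_neg (by simp)]
    simp
  | cons r rest ih =>
    intro F M k i n hk hi hn
    subst hk hi hn
    rw [removeEvenGo, dif_pos (by simp)]
    have hget : (F ++ M ++ r :: rest).getD (F.length + M.length) 0 = r := by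
      rw [List.getD_eq_getElem?_getD,
        show F ++ M ++ r :: rest = (F ++ M) ++ r :: rest by simp,
        List.getElem?_append_right (by simp)]
      simp
    rw [hget]
    by_cases he : PySem.Int.mod r 2 == 0
    · rw [if_pos he]
      have h0 : PySem.Int.mod r 2 = 0 := by simpa using he
      have hfil : (r :: rest).filter p = rest.filter p := by
        subst hp; rw [List.filter_cons]; simp
        exact (PySem.Int.mod_eq_zero_iff_dvd r 2).mp h0
      rw [hfil]
      have harr : F ++ M ++ r :: rest = F ++ (M ++ [r]) ++ rest := by simp
      rw [harr]
      obtain ⟨M', hM'⟩ := ih F (M ++ [r]) (M.length + 1) (F.length + M.length + 1)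
        (F.length + M.length + (r :: rest).length) (by simp) (by simp; omega)
        (by simp; omega)
      exact ⟨M', hM'⟩
    · rw [if_neg he]
      have h0 : ¬ PySem.Int.mod r 2 = 0 := by simpa using he
      have hfil : (r :: rest).filter p = r :: rest.filter p := by
        subst hp; rw [List.filter_cons]; simp
        have h1 : r % 2 ≠ 0 := by
          rw [← PySem.Int.mod_eq_emod_of_pos (by omega : (0:Int) < 2)]; exact h0
        omega
      rw [hfil, show F.length + M.length - M.length = F.length by omega]
      cases M with
      | nil =>
        have hset : (F ++ [] ++ r :: rest).set F.length r = (F ++ [r]) ++ [] ++ rest := by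
          simp
        rw [hset]
        obtain ⟨M', hM'⟩ := ih (F ++ [r]) [] ([] : List Int).length
          (F.length + ([] : List Int).length + 1)
          (F.length + ([] : List Int).length + (r :: rest).length)
          rfl (by simp) (by simp; omega)
        exact ⟨M', by rw [hM']; simp⟩
      | cons m M2 =>
        have hset : (F ++ (m :: M2) ++ r :: rest).set F.length r
            = (F ++ [r]) ++ (M2 ++ [r]) ++ rest := by simp
        rw [hset]
        obtain ⟨M', hM'⟩ := ih (F ++ [r]) (M2 ++ [r]) (m :: M2).length
          (F.length + (m :: M2).length + 1)
          (F.length + (m :: M2).length + (r :: rest).length)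
          (by simp) (by simp; omega) (by simp; omega)
        exact ⟨M', by rw [hM']; simp⟩

-- A's pop loop removes exactly the trailing garbage window.
lemma pop_spec : ∀ (d c k : Nat) (xs M : List Int), d = k - c → M.length = k - c →
    removeEvenPop (xs ++ M) c k = xs := by
  intro d
  induction d with
  | zero =>
    intro c k xs M hd hM
    rw [removeEvenPop, dif_neg (by omega)]
    have : M = [] := List.eq_nil_of_length_eq_zero (by omega)
    simp [this]
  | succ n ih =>
    intro c k xs M hd hM
    rw [removeEvenPop, dif_pos (by omega)]
    have hne : M ≠ [] := by
      intro h; subst h; simp at hM; omega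
    rw [List.dropLast_append_of_ne_nil hne]
    exact ih (c + 1) k xs M.dropLast (by omega) (by rw [List.length_dropLast]; omega)

-- ===== VERDICT (by name: the statement is the Claim_ definition above) =====
theorem removeEven_spec : Claim_equal_removeEven := by
  intro L _
  unfold Spec_removeEven removeEven removeEven_alt
  obtain ⟨M', hM'⟩ := go_spec (fun x => PySem.Int.mod x 2 != 0) rfl L [] [] 0 0 L.length
    rfl rfl (by simp)
  simp only [List.nil_append] at hM'
  rw [hM', show L.filter (fun x => PySem.Int.mod x 2 != 0) ++ M'
      = (L.filter fun x => PySem.Int.mod x 2 != 0) ++ M' by rfl]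
  exact pop_spec M'.length 0 M'.length _ M' (by omega) (by omega)
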